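-- pv_equiv track=rewrite | github.com/pkarthick/CodeWars | kyu/6/eureka.py | is_eureka
-- ===== SOURCE A (Python) =====
-- def is_eureka(num):
--   if num < 10:
--     return True
--   elif num == 10:
--     return False
--   else:
--     ds = []
--     q = num
--
--     while q > 10:
--       q, r = divmod(q, 10)
--       ds.append(r)
--
--     ds.append(q)
--
--     s = 0
--
--     for e in range(1, len(ds)+1):
--       s += pow(ds[-e], e)
--
--     return s == num
-- ===== SOURCE B (Python) =====
-- def is_eureka(num):
--     if num < 10:
--         return True
--     s = 0
--     q = num
--     p = 1
--     while p * 10 <= q: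
--         p *= 10
--     i = 1
--     while p > 0:
--         d, q = divmod(q, p)
--         s += d ** i
--         i += 1
--         p //= 10
--     return s == num
-- ===== Notes on version B (the rewrite author's own statement) =====
-- stated objective: simpler
-- what changed: A builds a reversed remainder list by repeated divmod and then makes a second indexing pass with negative indices; B keeps the small-number guard, finds the highest power of ten and sums digit**position in one most-significant-first arithmetic pass with no list, no indexing pass and no extra equality branch.
import Mathlib
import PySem

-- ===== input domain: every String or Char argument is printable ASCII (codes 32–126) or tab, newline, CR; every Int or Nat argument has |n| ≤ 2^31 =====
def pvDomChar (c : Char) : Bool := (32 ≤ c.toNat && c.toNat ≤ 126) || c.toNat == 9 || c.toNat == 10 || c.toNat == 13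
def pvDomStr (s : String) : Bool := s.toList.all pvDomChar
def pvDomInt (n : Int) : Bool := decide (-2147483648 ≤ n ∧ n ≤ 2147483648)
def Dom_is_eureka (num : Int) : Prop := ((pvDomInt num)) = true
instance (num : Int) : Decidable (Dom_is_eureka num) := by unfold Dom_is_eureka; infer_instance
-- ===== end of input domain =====

-- B replaces A's reversed remainder list + negative-index summing pass by one
-- most-significant-first arithmetic pass with no list and no extra equality branch: simpler.

-- ===== PORT A =====
-- the `while q > 10` loop: returns (final q, ds after the appends)
def isEurekaLoop (q : Int) (ds : List Int) : Int × List Int :=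
  if q > 10 then
    isEurekaLoop (PySem.Int.floordiv q 10) (ds ++ [PySem.Int.mod q 10])
  else (q, ds)
termination_by q.toNat
decreasing_by
  rw [PySem.Int.floordiv_eq_ediv_of_pos (by norm_num)]; omega

def is_eureka (num : Int) : Bool :=
  if num < 10 then true
  else if num == 10 then false
  else
    let qds := isEurekaLoop num []
    let ds := qds.2 ++ [qds.1]
    let s := (PySem.List.pyRange 1 ((ds.length : Int) + 1) 1).foldl
      (fun s e => s + PySem.List.pyGetD ds (-e) 0 ^ e.toNat) 0
    decide (s = num)

-- ===== PORT B =====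
-- `while p * 10 <= num: p *= 10`  (0 < p added only to make the recursion total;
-- it always holds on the reachable states, which start from p = 1)
def isEurekaAltFindP (num p : Int) : Int :=
  if 0 < p ∧ p * 10 ≤ num then isEurekaAltFindP num (p * 10) else p
termination_by (num - p).toNat
decreasing_by omega

-- `while p > 0: d, q = divmod(q, p); s += d ** i; i += 1; p //= 10`
def isEurekaAltSum (q p i s : Int) : Int :=
  if 0 < p then
    isEurekaAltSum (PySem.Int.mod q p) (PySem.Int.floordiv p 10) (i + 1)
      (s + PySem.Int.floordiv q p ^ i.toNat)
  else s
termination_by p.toNat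
decreasing_by
  rw [PySem.Int.floordiv_eq_ediv_of_pos (by norm_num)]; omega

def is_eureka_alt (num : Int) : Bool :=
  if num < 10 then true
  else
    let p := isEurekaAltFindP num 1
    decide (isEurekaAltSum num p 1 0 = num)

-- ===== PRECONDITION & SPEC =====
def Spec_is_eureka (num : Int) (out : Bool) : Prop := out = is_eureka_alt num
instance (num : Int) (out : Bool) : Decidable (Spec_is_eureka num out) := by unfold Spec_is_eureka; infer_instance

-- ===== CLAIM (what is proved, stated in full; the proofs are below) =====
def Claim_equal_is_eureka : Prop := ∀ (num : Int), Dom_is_eureka num → Spec_is_eureka num (is_eureka num)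

-- ===== LEMMAS AND PROOFS =====

-- digit-power sums over ℕ and ℤ
def pw : List ℕ → ℕ → ℕ
  | [], _ => 0
  | d :: t, i => d ^ i + pw t (i + 1)

def pwZ : List ℤ → ℕ → ℤ
  | [], _ => 0
  | d :: t, i => d ^ i + pwZ t (i + 1)

-- the k most significant of k decimal digits of b (b < 10^k), most significant first
def padDig : ℕ → ℕ → List ℕ
  | 0, _ => []
  | k + 1, b => b / 10 ^ k :: padDig k (b % 10 ^ k)

def psum (j p : ℕ) : ℕ := pw (padDig j p) 1

-- Σ_{t < len} 9^(i+t)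
def MsumLen : ℕ → ℕ → ℕ
  | _, 0 => 0
  | i, len + 1 => 9 ^ i + MsumLen (i + 1) len

-- verified pruned search: no x = P·10^(n-j) + m·10^(n-r+1) + S (m < 10^mid) has psum n x = x
def searchE : ℕ → ℕ → ℕ → ℕ → ℕ → ℕ → ℕ → ℕ → Bool
  | mid, n, j, P, powP, r, S, powS =>
    let smin := powP + powS
    let smax := smin + MsumLen (j + 1) mid
    let xmin := P * 10 ^ (n - j) + S
    let xmax := xmin + (10 ^ mid - 1) * 10 ^ (n + 1 - r)
    if smax < xmin ∨ xmax < smin then true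
    else match mid with
      | 0 => decide (smin ≠ xmin)
      | mid' + 1 =>
        if 9 ^ (r - 1) ≤ 10 ^ (n - j) then
          (List.range 10).all fun d =>
            searchE mid' n (j + 1) (10 * P + d) (powP + d ^ (j + 1)) r S powS
        else
          (List.range 10).all fun d =>
            searchE mid' n j P powP (r - 1) (d * 10 ^ (n + 1 - r) + S) (powS + d ^ (r - 1))

-- ℕ models of A's while-loop
def hdC (n : ℕ) : ℕ :=
  if n ≤ 10 then n else hdC (n / 10)
termination_by n
decreasing_by omega

def remC (n : ℕ) : List ℕ :=
  if n ≤ 10 then [] else n % 10 :: remC (n / 10)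
termination_by n
decreasing_by omega

def chunks (n : ℕ) : List ℕ := hdC n :: (remC n).reverse

-- basic lemmas
theorem pw_append (l1 l2 : List ℕ) (i : ℕ) :
    pw (l1 ++ l2) i = pw l1 i + pw l2 (i + l1.length) := by
  induction l1 generalizing i with
  | nil => simp [pw]
  | cons d t ih =>
    have h : i + (t.length + 1) = (i + 1) + t.length := by omega
    simp only [List.cons_append, pw, ih (i+1), List.length_cons, h]
    omega

theorem pwZ_append (l1 l2 : List ℤ) (i : ℕ) :
    pwZ (l1 ++ l2) i = pwZ l1 i + pwZ l2 (i + l1.length) := by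
  induction l1 generalizing i with
  | nil => simp [pwZ]
  | cons d t ih =>
    have h : i + (t.length + 1) = (i + 1) + t.length := by omega
    simp only [List.cons_append, pwZ, ih (i+1), List.length_cons, h]
    ring

theorem pwZ_map_cast (l : List ℕ) (i : ℕ) :
    pwZ (l.map (fun x : ℕ => (x : ℤ))) i = (pw l i : ℤ) := by
  induction l generalizing i with
  | nil => simp [pwZ, pw]
  | cons d t ih =>
    have h : pwZ (List.map (fun x : ℕ => (x : ℤ)) (d :: t)) i
        = (d : ℤ) ^ i + pwZ (List.map (fun x : ℕ => (x : ℤ)) t) (i + 1) := rfl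
    rw [h, ih]
    show ((d : ℤ)) ^ i + ((pw t (i+1) : ℕ) : ℤ) = ((pw (d :: t) i : ℕ) : ℤ)
    show ((d : ℤ)) ^ i + ((pw t (i+1) : ℕ) : ℤ) = ((d ^ i + pw t (i+1) : ℕ) : ℤ)
    push_cast
    ring

theorem padDig_length (k b : ℕ) : (padDig k b).length = k := by
  induction k generalizing b with
  | zero => simp [padDig]
  | succ k ih => simp [padDig, ih]

theorem padDig_split (j : ℕ) : ∀ (p k b : ℕ), b < 10 ^ k → p < 10 ^ j →
    padDig (j + k) (p * 10 ^ k + b) = padDig j p ++ padDig k b := by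
  induction j with
  | zero => intro p k b hb hp; interval_cases p; simp [padDig]
  | succ j ih =>
    intro p k b hb hp
    have h1 : j + 1 + k = (j + k) + 1 := by omega
    rw [h1]
    show (p * 10 ^ k + b) / 10 ^ (j + k) :: padDig (j + k) ((p * 10 ^ k + b) % 10 ^ (j + k))
        = (p / 10 ^ j :: padDig j (p % 10 ^ j)) ++ padDig k b
    have hjk : (10:ℕ) ^ (j + k) = 10 ^ j * 10 ^ k := by rw [pow_add]
    have hpq : p = 10 ^ j * (p / 10 ^ j) + p % 10 ^ j := (Nat.div_add_mod p (10 ^ j)).symm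
    have hs : p % 10 ^ j < 10 ^ j := Nat.mod_lt _ (by positivity)
    have hx : p * 10 ^ k + b = 10 ^ (j + k) * (p / 10 ^ j) + ((p % 10 ^ j) * 10 ^ k + b) := by
      rw [hjk]; nlinarith [hpq]
    have hlt : (p % 10 ^ j) * 10 ^ k + b < 10 ^ (j + k) := by
      have h1 : (p % 10 ^ j) * 10 ^ k + b < (p % 10 ^ j + 1) * 10 ^ k := by nlinarith
      have h2 : (p % 10 ^ j + 1) * 10 ^ k ≤ 10 ^ j * 10 ^ k :=
        Nat.mul_le_mul_right _ (by omega)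
      omega
    have hd : (p * 10 ^ k + b) / 10 ^ (j + k) = p / 10 ^ j := by
      rw [hx, Nat.mul_add_div (by positivity), Nat.div_eq_of_lt hlt]
      omega
    have hm : (p * 10 ^ k + b) % 10 ^ (j + k) = (p % 10 ^ j) * 10 ^ k + b := by
      rw [hx, Nat.mul_add_mod, Nat.mod_eq_of_lt hlt]
    rw [hd, hm, ih (p % 10 ^ j) k b hb hs]
    rfl

theorem pw_le_MsumLen (k : ℕ) : ∀ (b i : ℕ), b < 10 ^ k → pw (padDig k b) i ≤ MsumLen i k := by
  induction k with
  | zero => intro b i hb; simp [padDig, pw, MsumLen]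
  | succ k ih =>
    intro b i hb
    have hd : b / 10 ^ k ≤ 9 := by
      have h1 : b / 10 ^ k < 10 := Nat.div_lt_of_lt_mul (by rw [pow_succ] at hb; exact hb)
      omega
    calc pw (padDig (k+1) b) i = (b / 10 ^ k) ^ i + pw (padDig k (b % 10 ^ k)) (i+1) := rfl
      _ ≤ 9 ^ i + MsumLen (i+1) k :=
          Nat.add_le_add (Nat.pow_le_pow_left hd i) (ih _ _ (Nat.mod_lt _ (by positivity)))
      _ = MsumLen i (k+1) := rfl

theorem psum_snoc (j P d : ℕ) (hP : P < 10 ^ j) (hd : d < 10) :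
    psum (j + 1) (10 * P + d) = psum j P + d ^ (j + 1) := by
  unfold psum
  have h : padDig (j + 1) (10 * P + d) = padDig j P ++ padDig 1 d := by
    have := padDig_split j P 1 d (by omega) hP
    simpa [mul_comm] using this
  rw [h, pw_append, padDig_length]
  simp [padDig, pw, Nat.add_comm]

-- decomposition of psum over prefix / middle / suffix
theorem psum_decomp (n j mid u P m S : ℕ) (hn : n = j + mid + u)
    (hP : P < 10 ^ j) (hm : m < 10 ^ mid) (hS : S < 10 ^ u) :
    psum n (P * 10 ^ (mid + u) + m * 10 ^ u + S)
      = psum j P + pw (padDig mid m) (j + 1) + pw (padDig u S) (j + 1 + mid) := by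
  have hy : m * 10 ^ u + S < 10 ^ (mid + u) := by
    have h1 : m * 10 ^ u + S < (m + 1) * 10 ^ u := by nlinarith
    have h2 : (m + 1) * 10 ^ u ≤ 10 ^ mid * 10 ^ u := Nat.mul_le_mul_right _ (by omega)
    calc m * 10 ^ u + S < (m + 1) * 10 ^ u := h1
      _ ≤ 10 ^ mid * 10 ^ u := h2
      _ = 10 ^ (mid + u) := (pow_add 10 mid u).symm
  have hsplit1 : padDig n (P * 10 ^ (mid + u) + (m * 10 ^ u + S))
      = padDig j P ++ padDig (mid + u) (m * 10 ^ u + S) := by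
    rw [hn, show j + mid + u = j + (mid + u) from by ring]
    exact padDig_split j P (mid + u) (m * 10 ^ u + S) hy hP
  have hsplit2 : padDig (mid + u) (m * 10 ^ u + S) = padDig mid m ++ padDig u S :=
    padDig_split mid m u S hS hm
  unfold psum
  rw [show P * 10 ^ (mid + u) + m * 10 ^ u + S = P * 10 ^ (mid + u) + (m * 10 ^ u + S) from by ring]
  rw [hsplit1, hsplit2, pw_append, pw_append, padDig_length, padDig_length]
  rw [Nat.add_comm 1 j]
  omega

-- the core verified-search soundness
theorem searchE_sound (mid : ℕ) : ∀ (n j P powP r S powS : ℕ),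
    mid = r - 1 - j → j + 1 ≤ r → r ≤ n + 1 → 1 ≤ j → P < 10 ^ j →
    S < 10 ^ (n + 1 - r) → powP = psum j P → powS = pw (padDig (n + 1 - r) S) r →
    searchE mid n j P powP r S powS = true →
    ∀ m, m < 10 ^ mid →
      psum n (P * 10 ^ (n - j) + m * 10 ^ (n + 1 - r) + S)
        ≠ P * 10 ^ (n - j) + m * 10 ^ (n + 1 - r) + S := by
  induction mid with
  | zero =>
    intro n j P powP r S powS hmid hjr hrn hj hP hS hpowP hpowS hs m hm
    have h100 : (10:ℕ) ^ 0 = 1 := by norm_num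
    have hm0 : m = 0 := by omega
    subst hm0
    have hn : n = j + 0 + (n + 1 - r) := by omega
    have hnj : n - j = 0 + (n + 1 - r) := by omega
    have hdc := psum_decomp n j 0 (n + 1 - r) P 0 S hn hP (by norm_num) hS
    have hx : psum n (P * 10 ^ (n - j) + 0 * 10 ^ (n + 1 - r) + S) = powP + powS := by
      rw [hnj, hdc, show j + 1 + 0 = r from by omega, ← hpowP, ← hpowS]
      simp [padDig, pw]
    rw [searchE.eq_def] at hs
    simp only [] at hs
    by_cases hc : powP + powS + MsumLen (j + 1) 0 < P * 10 ^ (n - j) + S ∨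
        P * 10 ^ (n - j) + S + (10 ^ 0 - 1) * 10 ^ (n + 1 - r) < powP + powS
    · rw [hx]
      have hMs : MsumLen (j + 1) 0 = 0 := rfl
      rw [hMs, h100] at hc
      omega
    · rw [if_neg hc] at hs
      have hne := of_decide_eq_true hs
      rw [hx]
      omega
  | succ mid ih =>
    intro n j P powP r S powS hmid hjr hrn hj hP hS hpowP hpowS hs m hm
    have hpow1 : (10:ℕ) ^ (mid + 1) = 10 ^ mid * 10 := by ring
    have hpowj : (10:ℕ) ^ (j + 1) = 10 * 10 ^ j := by ring
    rw [searchE.eq_def] at hs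
    simp only [] at hs
    by_cases hc : powP + powS + MsumLen (j + 1) (mid + 1) < P * 10 ^ (n - j) + S ∨
        P * 10 ^ (n - j) + S + (10 ^ (mid + 1) - 1) * 10 ^ (n + 1 - r) < powP + powS
    · -- pruned by the interval bounds
      intro heq
      have hn : n = j + (mid + 1) + (n + 1 - r) := by omega
      have hnj : n - j = mid + 1 + (n + 1 - r) := by omega
      have hdc := psum_decomp n j (mid + 1) (n + 1 - r) P m S hn hP hm hS
      have hdc2 : psum n (P * 10 ^ (n - j) + m * 10 ^ (n + 1 - r) + S)
          = powP + pw (padDig (mid + 1) m) (j + 1) + powS := by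
        rw [hnj, hdc, show j + 1 + (mid + 1) = r from by omega, ← hpowP, ← hpowS]
      rw [hdc2] at heq
      have hb1 := pw_le_MsumLen (mid + 1) m (j + 1) hm
      have hb2 : m * 10 ^ (n + 1 - r) ≤ (10 ^ (mid + 1) - 1) * 10 ^ (n + 1 - r) :=
        Nat.mul_le_mul_right _ (by omega)
      omega
    · rw [if_neg hc] at hs
      by_cases hbr : 9 ^ (r - 1) ≤ 10 ^ (n - j)
      · -- prefix branch: fix the digit at position j+1
        rw [if_pos hbr] at hs
        have hall := List.all_eq_true.mp hs
        have hd9 : m / 10 ^ mid < 10 := Nat.div_lt_of_lt_mul (by omega)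
        have hsd : searchE mid n (j + 1) (10 * P + m / 10 ^ mid)
            (powP + (m / 10 ^ mid) ^ (j + 1)) r S powS = true := by
          have h := hall _ (List.mem_range.mpr hd9)
          exact h
        have IHm := ih n (j + 1) (10 * P + m / 10 ^ mid) (powP + (m / 10 ^ mid) ^ (j + 1)) r S powS
          (by omega) (by omega) hrn (by omega) (by omega) hS
          (by rw [hpowP, psum_snoc j P _ hP hd9])
          hpowS hsd (m % 10 ^ mid) (Nat.mod_lt _ (by positivity))
        have hmm : 10 ^ mid * (m / 10 ^ mid) + m % 10 ^ mid = m := Nat.div_add_mod m (10 ^ mid)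
        have hx : (10 * P + m / 10 ^ mid) * 10 ^ (n - (j + 1)) + m % 10 ^ mid * 10 ^ (n + 1 - r) + S
            = P * 10 ^ (n - j) + m * 10 ^ (n + 1 - r) + S := by
          have e2 : n - (j + 1) = mid + (n + 1 - r) := by omega
          have e1 : n - j = mid + (n + 1 - r) + 1 := by omega
          rw [e2, e1, pow_succ, pow_add]
          conv_rhs => rw [← hmm]
          ring
        rw [← hx]
        exact IHm
      · -- suffix branch: fix the digit at position r-1
        rw [if_neg hbr] at hs
        have hall := List.all_eq_true.mp hs
        have hd9 : m % 10 < 10 := Nat.mod_lt _ (by norm_num)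
        have hsd : searchE mid n j P powP (r - 1) (m % 10 * 10 ^ (n + 1 - r) + S)
            (powS + (m % 10) ^ (r - 1)) = true := by
          have h := hall _ (List.mem_range.mpr hd9)
          exact h
        have hu2 : n + 1 - (r - 1) = (n + 1 - r) + 1 := by omega
        have h9le : m % 10 * 10 ^ (n + 1 - r) ≤ 9 * 10 ^ (n + 1 - r) :=
          Nat.mul_le_mul_right _ (by omega)
        have hSnew : m % 10 * 10 ^ (n + 1 - r) + S < 10 ^ (n + 1 - (r - 1)) := by
          rw [hu2, pow_succ]
          omega
        have hpowSnew : powS + (m % 10) ^ (r - 1)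
            = pw (padDig (n + 1 - (r - 1)) (m % 10 * 10 ^ (n + 1 - r) + S)) (r - 1) := by
          rw [hu2]
          have hsplit := padDig_split 1 (m % 10) (n + 1 - r) S hS (by omega)
          rw [show (n + 1 - r) + 1 = 1 + (n + 1 - r) from by omega, hsplit]
          have h1 : padDig 1 (m % 10) = [m % 10] := by simp [padDig]
          rw [h1]
          show powS + (m % 10) ^ (r - 1) = (m % 10) ^ (r - 1) + pw (padDig (n + 1 - r) S) (r - 1 + 1)
          rw [show r - 1 + 1 = r from by omega, ← hpowS]
          ring
        have IHm := ih n j P powP (r - 1) (m % 10 * 10 ^ (n + 1 - r) + S) (powS + (m % 10) ^ (r - 1))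
          (by omega) (by omega) (by omega) hj hP hSnew hpowP hpowSnew hsd
          (m / 10) (by omega)
        have hmm : 10 * (m / 10) + m % 10 = m := Nat.div_add_mod m 10
        have hx : P * 10 ^ (n - j) + m / 10 * 10 ^ (n + 1 - (r - 1)) + (m % 10 * 10 ^ (n + 1 - r) + S)
            = P * 10 ^ (n - j) + m * 10 ^ (n + 1 - r) + S := by
          rw [hu2, pow_succ]
          conv_rhs => rw [← hmm]
          ring
        rw [← hx]
        exact IHm

-- A's loop characterization
theorem isEurekaLoop_eq (n : ℕ) : ∀ (ds : List Int),
    isEurekaLoop (n : Int) ds = ((hdC n : Int), ds ++ (remC n).map (fun x : ℕ => (x : ℤ))) := by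
  induction n using Nat.strong_induction_on with
  | _ n ih =>
    intro ds
    by_cases h : n ≤ 10
    · rw [isEurekaLoop, hdC, remC]
      have hq : ¬((n:ℤ) > 10) := by exact_mod_cast not_lt.mpr (by exact_mod_cast h : (n:ℤ) ≤ 10)
      rw [if_pos h, if_pos h, if_neg hq]
      simp
    · rw [isEurekaLoop, hdC, remC]
      have hq : ((n:ℤ) > 10) := by exact_mod_cast (by omega : (10:ℕ) < n)
      rw [if_pos hq, if_neg h, if_neg h]
      rw [show ((10:ℤ)) = ((10:ℕ):ℤ) by norm_num]
      rw [PySem.Int.floordiv_natCast, PySem.Int.mod_natCast]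
      rw [ih (n / 10) (by omega) (ds ++ [((n % 10 : ℕ) : ℤ)])]
      simp

-- A's summing pass
theorem pwZ_snoc (l : List ℤ) (x : ℤ) (i : ℕ) :
    pwZ (l ++ [x]) i = pwZ l i + x ^ (i + l.length) := by
  rw [pwZ_append]
  simp [pwZ]

theorem sumIdx (L : List ℤ) (s0 : ℤ) :
    (PySem.List.pyRange 1 ((L.length : Int) + 1) 1).foldl
      (fun s e => s + PySem.List.pyGetD L (-e) 0 ^ e.toNat) s0
    = s0 + pwZ L.reverse 1 := by
  induction L generalizing s0 with
  | nil => simp [pwZ, PySem.List.pyRange_one_eq_nil]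
  | cons x t ih =>
    have hlen : ((x :: t).length : ℤ) + 1 = ((t.length : ℤ) + 1) + 1 := by
      simp only [List.length_cons]
      push_cast
      ring
    rw [hlen, PySem.List.pyRange_one_succ_right (by omega), List.foldl_append]
    have hcongr : (PySem.List.pyRange 1 ((t.length : ℤ) + 1) 1).foldl
        (fun s e => s + PySem.List.pyGetD (x :: t) (-e) 0 ^ e.toNat) s0
        = (PySem.List.pyRange 1 ((t.length : ℤ) + 1) 1).foldl
        (fun s e => s + PySem.List.pyGetD t (-e) 0 ^ e.toNat) s0 := by
      apply PySem.List.foldl_congr_mem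
      intro acc e he
      rw [PySem.List.mem_pyRange_one] at he
      obtain ⟨he1, he2⟩ := he
      have hk : ∃ k : ℕ, e = (k : ℤ) ∧ 1 ≤ k ∧ k ≤ t.length := by
        refine ⟨e.toNat, by omega, by omega, by omega⟩
      obtain ⟨k, rfl, hk1, hk2⟩ := hk
      rw [PySem.List.pyGetD_neg_natCast (x :: t) k 0 (by omega) (by simp; omega),
          PySem.List.pyGetD_neg_natCast t k 0 (by omega) (by omega)]
      have hidx : t.length + 1 - k = (t.length - k) + 1 := by omega
      simp only [List.length_cons, hidx, List.getElem_cons_succ]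
    rw [hcongr, ih s0]
    simp only [List.foldl_cons, List.foldl_nil]
    have hlast : PySem.List.pyGetD (x :: t) (-((t.length : ℤ) + 1)) 0 = x := by
      have h1 : ((t.length : ℤ) + 1) = ((t.length + 1 : ℕ) : ℤ) := by push_cast; ring
      rw [h1, PySem.List.pyGetD_neg_natCast (x :: t) (t.length + 1) 0 (by omega) (by simp)]
      simp
    rw [hlast]
    have hexp : (((t.length : ℤ)) + 1).toNat = t.length + 1 := by omega
    rw [hexp]
    show s0 + pwZ t.reverse 1 + x ^ (t.length + 1) = s0 + pwZ (x :: t).reverse 1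
    rw [List.reverse_cons, pwZ_snoc]
    simp
    ring

-- B's loops characterization
theorem findP_spec (n : ℕ) (_hn : 1 ≤ n) : ∀ (p : ℕ), 1 ≤ p → p ≤ n →
    ∃ e : ℕ, isEurekaAltFindP (n : Int) (p : Int) = ((p * 10 ^ e : ℕ) : Int) ∧
      p * 10 ^ e ≤ n ∧ n < p * 10 ^ (e + 1) := by
  have key : ∀ (fuel p : ℕ), n - p < fuel → 1 ≤ p → p ≤ n →
      ∃ e : ℕ, isEurekaAltFindP (n : Int) (p : Int) = ((p * 10 ^ e : ℕ) : Int) ∧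
        p * 10 ^ e ≤ n ∧ n < p * 10 ^ (e + 1) := by
    intro fuel
    induction fuel with
    | zero => omega
    | succ fuel ih =>
      intro p hfuel hp1 hpn
      rw [isEurekaAltFindP]
      by_cases hc : p * 10 ≤ n
      · have hcz : (0 : ℤ) < (p : ℤ) ∧ (p : ℤ) * 10 ≤ (n : ℤ) := by
          constructor
          · exact_mod_cast hp1
          · exact_mod_cast hc
        rw [if_pos hcz]
        have hcast : (p : ℤ) * 10 = ((p * 10 : ℕ) : ℤ) := by push_cast; ring
        rw [hcast]
        obtain ⟨e, he, hle, hlt⟩ := ih (p * 10) (by omega) (by omega) (by omega)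
        refine ⟨e + 1, ?_, ?_, ?_⟩
        · rw [he]; congr 1; ring
        · calc p * 10 ^ (e + 1) = p * 10 * 10 ^ e := by ring
            _ ≤ n := hle
        · calc n < p * 10 * 10 ^ (e + 1) := hlt
            _ = p * 10 ^ (e + 1 + 1) := by ring
      · have hcz : ¬ ((0 : ℤ) < (p : ℤ) ∧ (p : ℤ) * 10 ≤ (n : ℤ)) := by
          rintro ⟨_, h2⟩
          exact hc (by exact_mod_cast h2)
        rw [if_neg hcz]
        exact ⟨0, by norm_num, by simpa using hpn, by simpa using by omega⟩
  intro p hp1 hpn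
  exact key (n - p + 1) p (by omega) hp1 hpn

theorem ten_cast : ((10 : ℕ) : ℤ) = (10 : ℤ) := by norm_num

theorem sumLoop_stop (q : ℤ) (i : ℤ) (s : ℤ) : isEurekaAltSum q 0 i s = s := by
  rw [isEurekaAltSum]
  norm_num

theorem sumLoop_eq (k : ℕ) : ∀ (q : ℕ) (i : ℕ) (s : ℤ), 1 ≤ i →
    isEurekaAltSum (q : Int) ((10 ^ k : ℕ) : Int) (i : Int) s
      = s + (pw (padDig (k + 1) q) i : ℤ) := by
  induction k with
  | zero =>
    intro q i s hi
    rw [isEurekaAltSum]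
    have hpos : (0 : ℤ) < ((10 ^ 0 : ℕ) : ℤ) := by norm_num
    rw [if_pos hpos]
    have h1 : ((10 ^ 0 : ℕ) : ℤ) = ((1 : ℕ) : ℤ) := by norm_num
    rw [h1, ← ten_cast, PySem.Int.mod_natCast, PySem.Int.floordiv_natCast,
      PySem.Int.floordiv_natCast]
    norm_num
    rw [sumLoop_stop]
    have : pw (padDig 1 q) i = q ^ i := by simp [padDig, pw]
    rw [this]
    push_cast
    ring
  | succ k ih =>
    intro q i s hi
    rw [isEurekaAltSum]
    have hpos : (0 : ℤ) < ((10 ^ (k + 1) : ℕ) : ℤ) := by positivity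
    rw [if_pos hpos]
    rw [← ten_cast, PySem.Int.mod_natCast, PySem.Int.floordiv_natCast,
      PySem.Int.floordiv_natCast]
    have hdiv10 : (10 : ℕ) ^ (k + 1) / 10 = 10 ^ k := by
      rw [pow_succ, Nat.mul_div_cancel _ (by norm_num)]
    rw [hdiv10]
    have hcasti : (i : ℤ) + 1 = ((i + 1 : ℕ) : ℤ) := by push_cast; ring
    rw [hcasti, ih (q % 10 ^ (k + 1)) (i + 1) _ (by omega)]
    have htn : ((i : ℤ)).toNat = i := Int.toNat_natCast i
    rw [htn]
    show s + ((q / 10 ^ (k + 1) : ℕ) : ℤ) ^ i + ((pw (padDig (k + 1) (q % 10 ^ (k + 1))) (i + 1) : ℕ) : ℤ)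
      = s + ((pw (padDig (k + 2) q) i : ℕ) : ℤ)
    have hpw : pw (padDig (k + 2) q) i
        = (q / 10 ^ (k + 1)) ^ i + pw (padDig (k + 1) (q % 10 ^ (k + 1))) (i + 1) := rfl
    rw [hpw]
    push_cast
    ring

-- chunk-list lemmas
theorem chunks_step (n : ℕ) (hn : 11 ≤ n) :
    chunks n = chunks (n / 10) ++ [n % 10] := by
  have h : ¬ n ≤ 10 := by omega
  unfold chunks
  rw [hdC, remC, if_neg h, if_neg h]
  simp

theorem chunks_eq_padDig (e : ℕ) : ∀ (n : ℕ), 10 ^ e ≤ n → n < 10 ^ (e + 1) →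
    hdC n ≠ 10 → chunks n = padDig (e + 1) n := by
  induction e with
  | zero =>
    intro n h1 h2 _
    have hn : n ≤ 10 := by omega
    unfold chunks
    rw [hdC, remC, if_pos hn, if_pos hn]
    simp [padDig]
  | succ e ih =>
    intro n h1 h2 hhd
    have hp1 : (10:ℕ) ^ (e + 1) = 10 * 10 ^ e := by ring
    have hp2 : (10:ℕ) ^ (e + 2) = 10 * 10 ^ (e + 1) := by ring
    have hpe : 1 ≤ (10:ℕ) ^ e := Nat.one_le_pow _ _ (by norm_num)
    have hne : n ≠ 10 := by
      intro he
      exact hhd (by rw [he, hdC]; norm_num)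
    have hn : 11 ≤ n := by omega
    have hd10 : hdC n = hdC (n / 10) := by
      rw [hdC]; rw [if_neg (by omega : ¬ n ≤ 10)]
    have hb1 : 10 ^ e ≤ n / 10 := by omega
    have hb2 : n / 10 < 10 ^ (e + 1) := by omega
    rw [chunks_step n hn, ih (n / 10) hb1 hb2 (by rw [← hd10]; exact hhd)]
    have hsplit := padDig_split (e + 1) (n / 10) 1 (n % 10) (by omega) hb2
    have hn10 : n / 10 * 10 ^ 1 + n % 10 = n := by omega
    rw [hn10] at hsplit
    rw [show e + 1 + 1 = e + 2 from rfl] at hsplit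
    rw [hsplit]
    simp [padDig]

theorem hdC_ten (n : ℕ) (hn : 1 ≤ n) (h : hdC n = 10) :
    ∃ k b : ℕ, n = 10 * 10 ^ k + b ∧ b < 10 ^ k := by
  induction n using Nat.strong_induction_on with
  | _ n ih =>
    by_cases hle : n ≤ 10
    · rw [hdC, if_pos hle] at h
      exact ⟨0, 0, by omega, by norm_num⟩
    · rw [hdC, if_neg hle] at h
      obtain ⟨k, b, hkb, hblt⟩ := ih (n / 10) (by omega) (by omega) h
      refine ⟨k + 1, 10 * b + n % 10, ?_, ?_⟩
      · have : (10:ℕ) ^ (k + 1) = 10 * 10 ^ k := by ring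
        omega
      · have : (10:ℕ) ^ (k + 1) = 10 * 10 ^ k := by ring
        omega

theorem chunks_ten (k : ℕ) : ∀ (b : ℕ), b < 10 ^ k →
    chunks (10 * 10 ^ k + b) = 10 :: padDig k b := by
  induction k with
  | zero =>
    intro b hb
    have hb0 : b = 0 := by omega
    subst hb0
    unfold chunks
    rw [hdC, remC]
    simp [padDig]
  | succ k ih =>
    intro b hb
    have hp1 : (10:ℕ) ^ (k + 1) = 10 * 10 ^ k := by ring
    have hpe : 1 ≤ (10:ℕ) ^ k := Nat.one_le_pow _ _ (by norm_num)
    have hn : 11 ≤ 10 * 10 ^ (k + 1) + b := by omega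
    rw [chunks_step _ hn]
    have hdiv : (10 * 10 ^ (k + 1) + b) / 10 = 10 * 10 ^ k + b / 10 := by omega
    have hmod : (10 * 10 ^ (k + 1) + b) % 10 = b % 10 := by omega
    rw [hdiv, hmod, ih (b / 10) (by omega)]
    have hsplit := padDig_split k (b / 10) 1 (b % 10) (by omega) (by omega)
    have hb10 : b / 10 * 10 ^ 1 + b % 10 = b := by omega
    rw [hb10] at hsplit
    rw [hsplit]
    simp [padDig]

theorem msum_bound (k : ℕ) (hk1 : 1 ≤ k) (hk : k ≤ 8) : 10 + MsumLen 2 k < 10 * 10 ^ k := by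
  interval_cases k <;> decide

set_option maxHeartbeats 4000000 in
theorem searchE_true : ∀ k : ℕ, 1 ≤ k → k ≤ 8 → searchE k (k+2) 2 10 1 (k+3) 0 0 = true := by
  intro k h1 h8
  interval_cases k <;> decide

theorem is_eureka_spec_aux (n : ℕ) (h10 : ¬ n = 10) (hn10 : 10 ≤ n) (hnD : n ≤ 2147483648) :
    is_eureka (n : ℤ) = is_eureka_alt (n : ℤ) := by
  have hlt : ¬ ((n : ℤ) < 10) := by exact_mod_cast not_lt.mpr (by exact_mod_cast hn10 : (10:ℤ) ≤ (n:ℤ))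
  -- B side
  obtain ⟨e, hfp, he1, he2⟩ := findP_spec n (by omega) 1 (by norm_num) (by omega)
  simp only [one_mul] at hfp he1 he2
  have hB : is_eureka_alt (n : ℤ) = decide (((psum (e+1) n : ℕ) : ℤ) = (n : ℤ)) := by
    unfold is_eureka_alt
    rw [if_neg hlt]
    simp only [show (1:ℤ) = ((1:ℕ):ℤ) from by norm_num, hfp,
      sumLoop_eq e n 1 0 le_rfl, zero_add]
    simp [psum]
  -- A side
  have h10' : ¬ (((n : ℤ) == 10) = true) := by
    simp only [beq_iff_eq]
    exact_mod_cast h10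
  have hA : is_eureka (n : ℤ) = decide (((pw (chunks n) 1 : ℕ) : ℤ) = (n : ℤ)) := by
    have hrev : (((remC n).map (fun x : ℕ => (x : ℤ))) ++ [((hdC n : ℕ) : ℤ)]).reverse
        = (chunks n).map (fun x : ℕ => (x : ℤ)) := by
      rw [List.reverse_append]
      simp [chunks, List.map_reverse]
    unfold is_eureka
    rw [if_neg hlt, if_neg h10']
    simp only [isEurekaLoop_eq n [], List.nil_append]
    simp only [sumIdx, zero_add, hrev, pwZ_map_cast]
  by_cases hhd : hdC n = 10
  · -- leading "10": both sides are false
    obtain ⟨k, b, hnk, hb⟩ := hdC_ten n (by omega) hhd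
    have hk1 : 1 ≤ k := by
      rcases k with _ | k
      · exfalso; simp at hb; omega
      · omega
    have hk8 : k ≤ 8 := by
      by_contra hk9
      have h9 : (10:ℕ) ^ 9 ≤ 10 ^ k := Nat.pow_le_pow_right (by norm_num) (by omega)
      have : (10:ℕ) ^ 9 = 1000000000 := by norm_num
      omega
    have hAsum : pw (chunks n) 1 < n := by
      rw [hnk, chunks_ten k b hb]
      have h1 : pw (10 :: padDig k b) 1 = 10 + pw (padDig k b) 2 := by simp [pw]
      rw [h1]
      have h2 := pw_le_MsumLen k b 2 hb
      have h3 := msum_bound k hk1 hk8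
      omega
    have hl : 10 ^ (k+1) ≤ n := by
      have h4 : (10:ℕ) ^ (k+1) = 10 * 10 ^ k := by ring
      omega
    have hr : n < 10 ^ (k+2) := by
      have h4 : (10:ℕ) ^ (k+2) = 100 * 10 ^ k := by ring
      omega
    have hek : e = k + 1 := by
      rcases lt_trichotomy e (k+1) with h | h | h
      · exfalso
        have : (10:ℕ) ^ (e+1) ≤ 10 ^ (k+1) := Nat.pow_le_pow_right (by norm_num) (by omega)
        omega
      · exact h
      · exfalso
        have : (10:ℕ) ^ (k+2) ≤ 10 ^ e := Nat.pow_le_pow_right (by norm_num) (by omega)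
        omega
    have hBne : psum (e+1) n ≠ n := by
      subst hek
      have hs := searchE_true k hk1 hk8
      have hsnd := searchE_sound k (k+2) 2 10 1 (k+3) 0 0
        (by omega) (by omega) (by omega) (by omega) (by norm_num)
        (by norm_num) (by decide) (by simp [padDig, pw]) hs b (by omega)
      have harg : 10 * 10 ^ (k + 2 - 2) + b * 10 ^ (k + 2 + 1 - (k + 3)) + 0 = n := by
        rw [show k + 2 - 2 = k from by omega, show k + 2 + 1 - (k + 3) = 0 from by omega]
        simp [hnk]
      rw [harg] at hsnd
      exact hsnd
    rw [hA, hB]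
    rw [decide_eq_false (by exact_mod_cast Nat.ne_of_lt hAsum),
        decide_eq_false (by exact_mod_cast hBne)]
  · -- no leading "10": the chunk list is the digit list, sums agree
    have hchunks := chunks_eq_padDig e n he1 he2 hhd
    rw [hA, hB, hchunks]
    rfl

-- ===== VERDICT (by name: the statement is the Claim_ definition above) =====
theorem is_eureka_spec : Claim_equal_is_eureka := by
  unfold Claim_equal_is_eureka Spec_is_eureka
  intro num hdom
  by_cases hlt : num < 10
  · unfold is_eureka is_eureka_alt
    rw [if_pos hlt, if_pos hlt]
  · have h0 : (0:ℤ) ≤ num := by omega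
    obtain ⟨n, rfl⟩ : ∃ n : ℕ, num = (n : ℤ) := ⟨num.toNat, by omega⟩
    have hn10 : 10 ≤ n := by
      have := not_lt.mp hlt
      exact_mod_cast this
    by_cases h10 : n = 10
    · subst h10
      -- A: the explicit `num == 10` branch; B: sum is 1 ≠ 10
      obtain ⟨e, hfp, he1, he2⟩ := findP_spec 10 (by norm_num) 1 (by norm_num) (by norm_num)
      simp only [one_mul] at hfp he1 he2
      have hek : e = 1 := by
        rcases e with _ | _ | e
        · norm_num at he2
        · rfl
        · exfalso
          have h2 : (10:ℕ) ^ 2 ≤ 10 ^ (e+2) := Nat.pow_le_pow_right (by norm_num) (by omega)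
          have h3 : (10:ℕ) ^ 2 = 100 := by norm_num
          omega
      subst hek
      have hB : is_eureka_alt ((10:ℕ) : ℤ) = decide (((psum 2 10 : ℕ) : ℤ) = ((10:ℕ) : ℤ)) := by
        unfold is_eureka_alt
        rw [if_neg (by norm_num)]
        simp only [show (1:ℤ) = ((1:ℕ):ℤ) from by norm_num, hfp,
          sumLoop_eq 1 10 1 0 le_rfl, zero_add]
        simp [psum]
      rw [hB, show psum 2 10 = 1 from by decide]
      unfold is_eureka
      rw [if_neg (by norm_num), if_pos (by norm_num)]
      norm_num
    · -- main case
      have hdom' : n ≤ 2147483648 := by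
        unfold Dom_is_eureka pvDomInt at hdom
        have := of_decide_eq_true hdom
        omega
      exact is_eureka_spec_aux n h10 hn10 hdom'
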